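-- pv_equiv track=rewrite | github.com/yyy01/LLMRiskEval_RCC | Components/generator.py | search_formula
-- ===== SOURCE A (Python) =====
-- def search_formula(formula) :
--     match_type = '0123456789+-*/%$.= ()\\'
--     pos = formula.find('=')
--     if pos == -1 : return None
--     else :
--         st, ed = pos, pos
--         while st >= 0 and formula[st] in match_type : st -= 1
--         while ed < len(formula) and formula[ed] in match_type : ed += 1
--         st += 1
--     return formula[st:ed]
-- ===== SOURCE B (Python) =====
-- def search_formula(formula):
--     match_type = set('0123456789+-*/%$.= ()\\')
--     pos = formula.find('=')
--     if pos == -1: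
--         return None
--     # single forward pass: collect maximal runs of allowed characters,
--     # then return the run that contains the first '='
--     runs = []
--     i, n = 0, len(formula)
--     while i < n:
--         if formula[i] in match_type:
--             j = i
--             while j < n and formula[j] in match_type:
--                 j += 1
--             runs.append((i, formula[i:j]))
--             i = j
--         else:
--             i += 1
--     for (s, r) in runs:
--         if s <= pos < s + len(r):
--             return r
-- ===== Notes on version B (the rewrite author's own statement) =====
-- stated objective: alternative
-- what changed: Replaces the two expanding while-loops around the '=' with a single forward tokenizer that collects every maximal run of allowed characters and then selects the run containing the first '='.
import Mathlib
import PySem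

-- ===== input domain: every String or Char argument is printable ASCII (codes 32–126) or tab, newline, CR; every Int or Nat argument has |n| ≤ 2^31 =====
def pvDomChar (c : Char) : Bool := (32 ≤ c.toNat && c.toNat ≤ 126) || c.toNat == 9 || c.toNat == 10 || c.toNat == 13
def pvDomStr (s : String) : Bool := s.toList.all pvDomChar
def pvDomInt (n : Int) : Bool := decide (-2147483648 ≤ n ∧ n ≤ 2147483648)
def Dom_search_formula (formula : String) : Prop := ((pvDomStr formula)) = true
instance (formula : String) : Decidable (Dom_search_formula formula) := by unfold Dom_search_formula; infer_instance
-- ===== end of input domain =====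

-- B replaces A's two expanding while-loops around the first '=' with a single forward
-- tokenizer over maximal runs of allowed characters plus a selection of the run containing
-- the '=' (alternative algorithm, same cost).


-- ===== PORT A =====
-- match_type = '0123456789+-*/%$.= ()\\' ; 'c in match_type' for a single char = list membership
def pvMatch : List Char := "0123456789+-*/%$.= ()\\".toList

-- while st >= 0 and formula[st] in match_type: st -= 1 ; afterwards st += 1 (value returned).
-- The index read is always in range in A's run (st ≤ pos < len), so getD with an unused default is exact.
def pvLeft (l : List Char) : Nat → Nat
  | 0 => if pvMatch.contains (l.getD 0 'a') then 0 else 1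
  | st + 1 => if pvMatch.contains (l.getD (st + 1) 'a') then pvLeft l st else st + 2

-- while ed < len(formula) and formula[ed] in match_type: ed += 1
def pvRight (l : List Char) (ed : Nat) : Nat :=
  if h : ed < l.length then
    if pvMatch.contains (l.getD ed 'a') then pvRight l (ed + 1) else ed
  else ed
termination_by l.length - ed

def search_formula (formula : String) : Option String :=
  let l := formula.toList
  let pos := PySem.Chars.find l ['=']          -- formula.find('=')
  if pos = -1 then none
  else
    let st := pvLeft l pos.toNat
    let ed := pvRight l pos.toNat
    -- formula[st:ed] with 0 ≤ st ≤ ed ≤ len equals drop/take (exact on this range)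
    some (String.ofList ((l.drop st).take (ed - st)))

-- ===== PORT B =====
-- one forward pass collecting (start, run) for every maximal run of allowed characters
def pvRuns (l : List Char) (i : Nat) : List (Nat × List Char) :=
  match l with
  | [] => []
  | c :: rest =>
    if pvMatch.contains c then
      let run := c :: rest.takeWhile (fun d => pvMatch.contains d)
      (i, run) :: pvRuns (rest.dropWhile (fun d => pvMatch.contains d)) (i + run.length)
    else
      pvRuns rest (i + 1)
termination_by l.length
decreasing_by
  · exact Nat.lt_succ_of_le (List.length_dropWhile_le _ _)
  · simp

-- for (s, r) in runs: if s <= pos < s + len(r): return r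
def pvFindRun : List (Nat × List Char) → Nat → Option String
  | [], _ => none
  | (s, r) :: rest, p =>
    if s ≤ p ∧ p < s + r.length then some (String.ofList r) else pvFindRun rest p

def search_formula_alt (formula : String) : Option String :=
  let l := formula.toList
  let pos := PySem.Chars.find l ['=']          -- formula.find('=')
  if pos = -1 then none
  else pvFindRun (pvRuns l 0) pos.toNat

-- ===== PRECONDITION & SPEC =====
def Spec_search_formula (formula : String) (out : Option String) : Prop := out = search_formula_alt formula
instance (formula : String) (out : Option String) : Decidable (Spec_search_formula formula out) := by unfold Spec_search_formula; infer_instance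

-- ===== CLAIM (what is proved, stated in full; the proofs are below) =====
def Claim_equal_search_formula : Prop := ∀ (formula : String), Dom_search_formula formula → Spec_search_formula formula (search_formula formula)

-- ===== LEMMAS AND PROOFS =====

-- targeted equation lemmas
theorem pvLeft_eq_zero (l : List Char) :
    pvLeft l 0 = if pvMatch.contains (l.getD 0 'a') then 0 else 1 := by rw [pvLeft]

theorem pvLeft_eq_succ (l : List Char) (st : Nat) :
    pvLeft l (st + 1) =
      if pvMatch.contains (l.getD (st + 1) 'a') then pvLeft l st else st + 2 := by rw [pvLeft]

theorem pvRight_eq (l : List Char) (ed : Nat) :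
    pvRight l ed =
      if ed < l.length then
        (if pvMatch.contains (l.getD ed 'a') then pvRight l (ed + 1) else ed)
      else ed := by
  rw [pvRight]; split_ifs <;> rfl

theorem pvRuns_cons_pos (c : Char) (rest : List Char) (i : Nat)
    (hc : pvMatch.contains c = true) :
    pvRuns (c :: rest) i =
      (i, c :: rest.takeWhile (fun d => pvMatch.contains d)) ::
        pvRuns (rest.dropWhile (fun d => pvMatch.contains d))
          (i + (c :: rest.takeWhile (fun d => pvMatch.contains d)).length) := by
  rw [pvRuns, if_pos hc]

theorem pvRuns_cons_neg (c : Char) (rest : List Char) (i : Nat)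
    (hc : pvMatch.contains c = false) :
    pvRuns (c :: rest) i = pvRuns rest (i + 1) := by
  rw [pvRuns, if_neg (by rw [hc]; simp)]

-- getD over an append, right part
theorem pvGetD_append_right (u v : List Char) (k : Nat) :
    (u ++ v).getD (u.length + k) 'a' = v.getD k 'a' := by
  rw [List.getD_append_right _ _ _ _ (by omega)]
  congr 1; omega

-- pvRight shifts over any prefix
theorem pvRight_append (u v : List Char) (q : Nat) :
    pvRight (u ++ v) (u.length + q) = u.length + pvRight v q := by
  by_cases h : q < v.length
  · have hlt : u.length + q < (u ++ v).length := by simp; omega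
    rw [pvRight_eq (u ++ v), if_pos hlt, pvGetD_append_right, pvRight_eq v, if_pos h]
    by_cases hc : pvMatch.contains (v.getD q 'a')
    · rw [if_pos hc, if_pos hc, Nat.add_assoc]
      exact pvRight_append u v (q + 1)
    · rw [if_neg hc, if_neg hc]
  · have h1 : ¬ u.length + q < (u ++ v).length := by simp; omega
    rw [pvRight_eq (u ++ v), if_neg h1, pvRight_eq v, if_neg h]
termination_by v.length - q

theorem pvRight_stop (l : List Char) (p : Nat)
    (h : ¬ p < l.length ∨ pvMatch.contains (l.getD p 'a') = false) :
    pvRight l p = p := by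
  rw [pvRight_eq]
  rcases h with h | h
  · rw [if_neg h]
  · split_ifs with h1 h2
    · rw [h] at h2; exact absurd h2 (by simp)
    · rfl
    · rfl

theorem pvRight_all (l : List Char) (p m : Nat) (hpm : p ≤ m) (hm : m ≤ l.length)
    (hall : ∀ k, p ≤ k → k < m → pvMatch.contains (l.getD k 'a') = true)
    (hstop : pvRight l m = m) : pvRight l p = m := by
  rcases Nat.eq_or_lt_of_le hpm with rfl | hlt
  · exact hstop
  · rw [pvRight_eq, if_pos (by omega), if_pos (hall p le_rfl hlt)]
    exact pvRight_all l (p + 1) m hlt hm (fun k hk1 hk2 => hall k (by omega) hk2) hstop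
termination_by m - p

-- pvLeft: stepping over a leading disallowed char
theorem pvLeft_cons (c : Char) (rest : List Char) (hc : pvMatch.contains c = false) (q : Nat) :
    pvLeft (c :: rest) (q + 1) = pvLeft rest q + 1 := by
  induction q with
  | zero =>
    rw [pvLeft_eq_succ, pvLeft_eq_zero rest]
    simp only [List.getD_cons_succ]
    by_cases h0 : pvMatch.contains (rest.getD 0 'a')
    · rw [if_pos h0, if_pos h0, pvLeft_eq_zero, List.getD_cons_zero, hc]; simp
    · rw [if_neg h0, if_neg h0]
  | succ q ih =>
    rw [pvLeft_eq_succ (c :: rest) (q + 1), pvLeft_eq_succ rest q]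
    simp only [List.getD_cons_succ]
    by_cases h0 : pvMatch.contains (rest.getD (q + 1) 'a')
    · rw [if_pos h0, if_pos h0, ih]
    · rw [if_neg h0, if_neg h0]

theorem pvLeft_zero (l : List Char) (p : Nat)
    (hall : ∀ k, k ≤ p → pvMatch.contains (l.getD k 'a') = true) : pvLeft l p = 0 := by
  induction p with
  | zero => rw [pvLeft_eq_zero, if_pos (hall 0 le_rfl)]
  | succ p ih =>
    rw [pvLeft_eq_succ, if_pos (hall (p + 1) le_rfl)]
    exact ih (fun k hk => hall k (by omega))

theorem pvLeft_append (u v : List Char) (h0 : pvMatch.contains (v.getD 0 'a') = false) (q : Nat) :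
    pvLeft (u ++ v) (u.length + q) = u.length + pvLeft v q := by
  induction q with
  | zero =>
    have hv0 : pvLeft v 0 = 1 := by rw [pvLeft_eq_zero, h0]; simp
    rw [hv0]
    match hu : u.length with
    | 0 =>
      rw [pvLeft_eq_zero]
      have : (u ++ v).getD 0 'a' = v.getD 0 'a' := by
        have := pvGetD_append_right u v 0
        rw [hu] at this; simpa using this
      rw [this, h0]; simp
    | w + 1 =>
      rw [pvLeft_eq_succ]
      have : (u ++ v).getD (w + 1) 'a' = v.getD 0 'a' := by
        have := pvGetD_append_right u v 0
        rw [hu] at this; simpa using this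
      rw [this, h0]; simp
  | succ q ih =>
    rw [← Nat.add_assoc, pvLeft_eq_succ (u ++ v) (u.length + q)]
    have harr : u.length + q + 1 = u.length + (q + 1) := by omega
    rw [harr, pvGetD_append_right, pvLeft_eq_succ v q]
    by_cases h : pvMatch.contains (v.getD (q + 1) 'a')
    · rw [if_pos h, if_pos h, ih]
    · rw [if_neg h, if_neg h]; omega

-- the first element of a dropWhile, if any, fails the predicate
theorem pvDropWhile_head (rest : List Char)
    (h : rest.dropWhile (fun d => pvMatch.contains d) ≠ []) :
    pvMatch.contains ((rest.dropWhile (fun d => pvMatch.contains d)).getD 0 'a') = false := by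
  induction rest with
  | nil => simp at h
  | cons c cs ih =>
    rw [List.dropWhile_cons] at h ⊢
    by_cases hc : pvMatch.contains c
    · rw [if_pos hc] at h ⊢
      exact ih h
    · rw [if_neg hc]
      simpa using hc

-- main correspondence: B's run lookup equals A's center expansion
theorem pvMain (n : Nat) : ∀ (l : List Char), l.length ≤ n → ∀ (i p : Nat), p < l.length →
    pvMatch.contains (l.getD p 'a') = true →
    pvFindRun (pvRuns l i) (i + p) =
      some (String.ofList ((l.drop (pvLeft l p)).take (pvRight l p - pvLeft l p))) := by
  induction n with
  | zero => intro l hl i p hp _; omega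
  | succ n ih =>
    intro l hl i p hp hap
    match l with
    | [] => simp at hp
    | c :: rest =>
      by_cases hc : pvMatch.contains c = true
      · set t := rest.takeWhile (fun d => pvMatch.contains d) with ht
        set tail := rest.dropWhile (fun d => pvMatch.contains d) with htail
        have hsplit : c :: rest = (c :: t) ++ tail := by
          simp [ht, htail, List.takeWhile_append_dropWhile]
        have hlen : (c :: rest).length = (t.length + 1) + tail.length := by
          conv_lhs => rw [hsplit]
          simp; omega
        have htall : ∀ x ∈ t, pvMatch.contains x = true := by
          rw [ht]
          exact fun x hx => List.mem_takeWhile_imp hx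
        -- every position below the first run's end is allowed
        have hrun_all : ∀ k, k < t.length + 1 → pvMatch.contains ((c :: rest).getD k 'a') = true := by
          intro k hk
          match k with
          | 0 => simpa using hc
          | j + 1 =>
            have hjt : j < t.length := by omega
            have hgd : (c :: rest).getD (j + 1) 'a' = t[j] := by
              rw [hsplit]
              rw [show ((c :: t) ++ tail).getD (j + 1) 'a' = (c :: t).getD (j + 1) 'a' from
                List.getD_append _ _ _ _ (by simp; omega)]
              simp [List.getD_eq_getElem?_getD, List.getElem?_eq_getElem hjt]
            rw [hgd]
            exact htall t[j] (List.getElem_mem hjt)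
        have htail0 : tail ≠ [] → pvMatch.contains (tail.getD 0 'a') = false := by
          intro hnil
          rw [htail]
          exact pvDropWhile_head rest (by rw [← htail]; exact hnil)
        -- at the first run's end either the list stops or the char is disallowed
        have hstop : pvRight (c :: rest) (t.length + 1) = t.length + 1 := by
          apply pvRight_stop
          by_cases hnil : tail = []
          · left; rw [hlen, hnil]; simp
          · right
            have hget : (c :: rest).getD (t.length + 1) 'a' = tail.getD 0 'a' := by
              conv_lhs => rw [hsplit]
              have := pvGetD_append_right (c :: t) tail 0
              simpa using this
            rw [hget]
            exact htail0 hnil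
        rw [pvRuns_cons_pos c rest i hc, ← ht, ← htail]
        simp only [List.length_cons]
        clear_value t tail
        clear ht htail htall
        by_cases hpm : p < t.length + 1
        · -- p inside the first run
          rw [pvFindRun, if_pos (by simp only [List.length_cons]; omega)]
          have hL : pvLeft (c :: rest) p = 0 :=
            pvLeft_zero _ _ (fun k hk => hrun_all k (by omega))
          have hR : pvRight (c :: rest) p = t.length + 1 :=
            pvRight_all _ p (t.length + 1) (by omega) (by omega)
              (fun k _ hk2 => hrun_all k hk2) hstop
          rw [hL, hR]
          have htake : ((c :: rest).drop 0).take (t.length + 1 - 0) = c :: t := by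
            rw [List.drop_zero]
            conv_lhs => rw [hsplit]
            rw [show t.length + 1 - 0 = (c :: t).length by simp]
            exact List.take_left
          rw [htake]
        · -- p beyond the first run: recurse into the tail
          have hm : t.length + 1 ≤ p := by omega
          have hptail : p - (t.length + 1) < tail.length := by omega
          have htailne : tail ≠ [] := by
            intro hnil; rw [hnil] at hptail; simp at hptail
          have htlen : tail.length ≤ n := by omega
          have hatail : pvMatch.contains (tail.getD (p - (t.length + 1)) 'a') = true := by
            have hg := pvGetD_append_right (c :: t) tail (p - (t.length + 1))
            simp only [List.length_cons] at hg
            rw [show t.length + 1 + (p - (t.length + 1)) = p by omega] at hg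
            rw [hsplit] at hap
            rwa [hg] at hap
          rw [pvFindRun, if_neg (by simp only [List.length_cons]; omega)]
          rw [show i + p = (i + (t.length + 1)) + (p - (t.length + 1)) by omega]
          rw [ih tail htlen (i + (t.length + 1)) (p - (t.length + 1)) hptail hatail]
          have hL : pvLeft (c :: rest) p = (t.length + 1) + pvLeft tail (p - (t.length + 1)) := by
            conv_lhs => rw [hsplit, show p = (c :: t).length + (p - (t.length + 1)) by simp only [List.length_cons]; omega]
            rw [pvLeft_append _ _ (htail0 htailne)]
            simp
          have hR : pvRight (c :: rest) p = (t.length + 1) + pvRight tail (p - (t.length + 1)) := by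
            conv_lhs => rw [hsplit, show p = (c :: t).length + (p - (t.length + 1)) by simp only [List.length_cons]; omega]
            rw [pvRight_append]
            simp
          rw [hL, hR]
          have hdrop : (c :: rest).drop ((t.length + 1) + pvLeft tail (p - (t.length + 1)))
              = tail.drop (pvLeft tail (p - (t.length + 1))) := by
            conv_lhs => rw [hsplit]
            rw [List.drop_append]
            rw [List.drop_eq_nil_iff.mpr (by simp only [List.length_cons]; omega), List.nil_append]
            congr 1
            simp
          rw [hdrop, show (t.length + 1) + pvRight tail (p - (t.length + 1))
              - ((t.length + 1) + pvLeft tail (p - (t.length + 1)))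
              = pvRight tail (p - (t.length + 1)) - pvLeft tail (p - (t.length + 1)) by omega]
      · have hc' : pvMatch.contains c = false := by simpa using hc
        match p with
        | 0 => rw [List.getD_cons_zero] at hap; rw [hap] at hc'; simp at hc'
        | q + 1 =>
          rw [pvRuns_cons_neg c rest i hc']
          have hq : rest.length ≤ n := by simp at hl; omega
          have hqlt : q < rest.length := by simp at hp; omega
          have haq : pvMatch.contains (rest.getD q 'a') = true := by simpa using hap
          rw [show i + (q + 1) = (i + 1) + q by omega]
          rw [ih rest hq (i + 1) q hqlt haq]
          have hL := pvLeft_cons c rest hc' q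
          have hR : pvRight (c :: rest) (q + 1) = pvRight rest q + 1 := by
            have h2 := pvRight_append [c] rest q
            simpa [Nat.add_comm] using h2
          rw [hL, hR, List.drop_succ_cons,
            show pvRight rest q + 1 - (pvLeft rest q + 1) = pvRight rest q - pvLeft rest q by omega]

-- the char at the found index is '=', which is allowed
theorem pvFound (l : List Char) (h : PySem.Chars.find l ['='] ≠ -1) :
    (PySem.Chars.find l ['=']).toNat < l.length ∧
      pvMatch.contains (l.getD (PySem.Chars.find l ['=']).toNat 'a') = true := by
  have hnn : 0 ≤ PySem.Chars.find l ['='] := by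
    have := PySem.Chars.neg_one_le_find l ['=']
    omega
  obtain ⟨hpre, -⟩ := PySem.Chars.find_spec hnn
  obtain ⟨tl, htl⟩ := hpre
  simp only [List.singleton_append] at htl
  set k := (PySem.Chars.find l ['=']).toNat with hk
  have hget : l.getD k 'a' = '=' := by
    have h0 : (l.drop k)[0]? = some '=' := by rw [← htl]; rfl
    rw [List.getD_eq_getElem?_getD,
      show l[k]? = (l.drop k)[0]? from by rw [List.getElem?_drop, Nat.add_zero], h0]
    rfl
  have hlt : k < l.length := by
    by_contra hge
    have : l.drop k = [] := List.drop_eq_nil_iff.mpr (by omega)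
    rw [this] at htl; simp at htl
  exact ⟨hlt, by rw [hget]; decide⟩

-- ===== VERDICT (by name: the statement is the Claim_ definition above) =====
theorem search_formula_spec : Claim_equal_search_formula := by
  intro formula _
  unfold Spec_search_formula search_formula search_formula_alt
  by_cases h : PySem.Chars.find formula.toList ['='] = -1
  · simp [h]
  · simp only [h, ite_false]
    obtain ⟨hlt, hall⟩ := pvFound formula.toList h
    have hmain := pvMain formula.toList.length formula.toList le_rfl 0
      (PySem.Chars.find formula.toList ['=']).toNat hlt hall
    rw [Nat.zero_add] at hmain
    exact hmain.symm
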